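-- pv_equiv track=rewrite | github.com/sakuranaga/local-ai-search | backend/app/services/ai_agent.py | _truncate_repetition
-- ===== SOURCE A (Python) =====
-- def _truncate_repetition(
--     text: str, min_repeat_len: int = 20, max_repeats: int = 2
-- ) -> str:
--     """Detect and truncate repetitive text from LLM output."""
--     for pattern_len in range(min_repeat_len, min(200, len(text) // 3), 5):
--         for start in range(len(text) - pattern_len * (max_repeats + 1)):
--             pattern = text[start : start + pattern_len]
--             count = 0
--             pos = start
--             while pos + pattern_len <= len(text):
--                 if text[pos : pos + pattern_len] == pattern:
--                     count += 1
--                     pos += pattern_len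
--                 else:
--                     break
--             if count > max_repeats:
--                 truncated = text[: start + pattern_len].rstrip("-_ ")
--                 return truncated
--     return text
-- ===== SOURCE B (Python) =====
-- def _truncate_repetition(
--     text: str, min_repeat_len: int = 20, max_repeats: int = 2
-- ) -> str:
--     """Detect and truncate repetitive text from LLM output.
--
--     Per candidate pattern length L, instead of re-comparing slices for every
--     start, compute in one right-to-left pass the run length of positions i
--     with text[i] == text[i + L]; a start position begins max_repeats + 1
--     consecutive copies of its length-L pattern exactly when that run is at
--     least L * max_repeats.  O(n) per L instead of O(n * run) slice compares.
--     """
--     n = len(text)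
--     for pattern_len in range(min_repeat_len, min(200, n // 3), 5):
--         starts = n - pattern_len * (max_repeats + 1)
--         if starts <= 0:
--             continue
--         need = pattern_len * max_repeats
--         run = 0
--         best = None
--         for i in range(n - pattern_len - 1, -1, -1):
--             run = run + 1 if text[i] == text[i + pattern_len] else 0
--             if i < starts and run >= need:
--                 best = i
--         if best is not None:
--             return text[: best + pattern_len].rstrip("-_ ")
--     return text
-- ===== Notes on version B (the rewrite author's own statement) =====
-- stated objective: faster
-- what changed: Per candidate pattern length L, B replaces A's per-start pattern slicing and greedy slice-compare counting loop by a single right-to-left pass that maintains the run length of positions i with text[i] == text[i+L]; a start begins max_repeats+1 consecutive copies exactly when that run is at least L*max_repeats, so the leftmost qualifying start is found in one O(n) sweep per L.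
-- outside the precondition, e.g. on _truncate_repetition('abcdefghijklmnopqr', -4, -1): A returns 'abcdefghijklmn', B raises IndexError; on _truncate_repetition('hello world', -3, 2): A returns 'hello', B raises IndexError; on _truncate_repetition('', -5, -1): A returns '', B returns ''
import Mathlib
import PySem

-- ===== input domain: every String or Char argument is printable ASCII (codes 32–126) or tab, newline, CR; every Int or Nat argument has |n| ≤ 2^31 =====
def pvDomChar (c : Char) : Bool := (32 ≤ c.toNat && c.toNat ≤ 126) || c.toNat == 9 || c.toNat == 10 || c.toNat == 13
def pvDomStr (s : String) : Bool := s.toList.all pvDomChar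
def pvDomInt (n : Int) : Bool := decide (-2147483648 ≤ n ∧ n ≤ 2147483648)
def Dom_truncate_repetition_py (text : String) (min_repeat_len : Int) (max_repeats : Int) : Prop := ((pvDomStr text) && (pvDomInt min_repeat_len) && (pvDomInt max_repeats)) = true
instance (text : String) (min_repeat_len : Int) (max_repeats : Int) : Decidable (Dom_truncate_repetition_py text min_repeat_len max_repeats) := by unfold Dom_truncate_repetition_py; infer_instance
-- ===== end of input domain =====

-- B replaces A's per-start slice-compare-and-count scan by one right-to-left
-- equality-shift pass per pattern length (run lengths of text[i] == text[i+L]),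
-- a different algorithm intended to be faster.

-- ===== PORT A =====
-- a Python 'for' loop whose body may 'return': first hit wins (both A and B use one)
def pvFirstHit (f : Int → Option (List Char)) : List Int → Option (List Char)
  | [] => none
  | x :: xs =>
    match f x with
    | some r => some r
    | none => pvFirstHit f xs

-- s.rstrip(chars): drop the trailing characters that belong to chars (exact)
def pvRstrip (cs : List Char) (chars : List Char) : List Char :=
  (cs.reverse.dropWhile (fun c => chars.contains c)).reverse

-- A's inner 'while' loop; fuel only bounds the iterations (cs.length + 1 is
-- enough whenever 1 ≤ pattern_len, since pos grows by pattern_len each step)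
def pvCountA (cs pattern : List Char) (L : Int) (pos count : Int) : Nat → Int
  | 0 => count
  | fuel+1 =>
    if pos + L ≤ (cs.length : Int) then
      if PySem.List.slice cs (some pos) (some (pos + L)) = pattern then
        pvCountA cs pattern L (pos + L) (count + 1) fuel
      else count
    else count

def truncate_repetition_py (text : String) (min_repeat_len : Int) (max_repeats : Int) : String :=
  let cs := text.toList
  let n : Int := (cs.length : Int)
  let res := pvFirstHit (fun pattern_len =>
      pvFirstHit (fun start =>
          let pattern := PySem.List.slice cs (some start) (some (start + pattern_len))
          let count := pvCountA cs pattern pattern_len start 0 (cs.length + 1)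
          if count > max_repeats then
            some (pvRstrip (PySem.List.slice cs none (some (start + pattern_len))) ['-', '_', ' '])
          else none)
        (PySem.List.pyRange 0 (n - pattern_len * (max_repeats + 1)) 1))
    (PySem.List.pyRange min_repeat_len (min 200 (PySem.Int.floordiv n 3)) 5)
  match res with
  | some r => String.ofList r
  | none => text

-- ===== PORT B =====
-- B's right-to-left pass for one pattern length: state (run, best), i = n-L-1 … 0
def pvRunBest (cs : List Char) (L starts need : Int) : Option Int :=
  ((PySem.List.pyRange ((cs.length : Int) - L - 1) (-1) (-1)).foldl
    (fun (st : Int × Option Int) i =>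
      let run := if PySem.List.pyGetD cs i ' ' = PySem.List.pyGetD cs (i + L) ' ' then st.1 + 1 else 0
      let best := if i < starts ∧ need ≤ run then some i else st.2
      (run, best))
    (0, none)).2

def truncate_repetition_py_alt (text : String) (min_repeat_len : Int) (max_repeats : Int) : String :=
  let cs := text.toList
  let n : Int := (cs.length : Int)
  let res := pvFirstHit (fun pattern_len =>
      let starts := n - pattern_len * (max_repeats + 1)
      if starts ≤ 0 then none
      else
        match pvRunBest cs pattern_len starts (pattern_len * max_repeats) with
        | some best => some (pvRstrip (PySem.List.slice cs none (some (best + pattern_len))) ['-', '_', ' '])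
        | none => none)
    (PySem.List.pyRange min_repeat_len (min 200 (PySem.Int.floordiv n 3)) 5)
  match res with
  | some r => String.ofList r
  | none => text

-- ===== PRECONDITION & SPEC =====
-- Pre_ excludes non-positive min_repeat_len with a non-empty pattern-length range:
-- there A's empty/negative-length patterns make its while loop diverge on most
-- inputs and, where it does return, the value is an artefact of Python's
-- negative-slice wraparound on which B's direct indexing raises IndexError.
def Pre_truncate_repetition_py (text : String) (min_repeat_len : Int) (max_repeats : Int) : Prop :=
  1 ≤ min_repeat_len ∨ min 200 (PySem.Int.floordiv (text.toList.length : Int) 3) ≤ min_repeat_len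
instance (text : String) (min_repeat_len : Int) (max_repeats : Int) : Decidable (Pre_truncate_repetition_py text min_repeat_len max_repeats) := by unfold Pre_truncate_repetition_py; infer_instance

def pvWitness_truncate_repetition_py : String × Int × Int := ("abcd-abcd-abcd-abcd-abcd-xyz", 1, 2)

def Spec_truncate_repetition_py (text : String) (min_repeat_len : Int) (max_repeats : Int) (out : String) : Prop := out = truncate_repetition_py_alt text min_repeat_len max_repeats
instance (text : String) (min_repeat_len : Int) (max_repeats : Int) (out : String) : Decidable (Spec_truncate_repetition_py text min_repeat_len max_repeats out) := by unfold Spec_truncate_repetition_py; infer_instance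

-- ===== CLAIM (what is proved, stated in full; the proofs are below) =====
def Claim_equal_truncate_repetition_py : Prop := ∀ (text : String) (min_repeat_len : Int) (max_repeats : Int), Dom_truncate_repetition_py text min_repeat_len max_repeats → Pre_truncate_repetition_py text min_repeat_len max_repeats → Spec_truncate_repetition_py text min_repeat_len max_repeats (truncate_repetition_py text min_repeat_len max_repeats)

-- ===== LEMMAS AND PROOFS =====

-- specification-side objects used only by the proofs
def pvBlock (cs : List Char) (l p : ℕ) : List Char := (cs.drop p).take l

def pvRunN (cs : List Char) (l i : ℕ) : ℕ :=
  if h : i < cs.length - l ∧ cs.getD i ' ' = cs.getD (i + l) ' ' then pvRunN cs l (i + 1) + 1 else 0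
termination_by cs.length - l - i
decreasing_by omega

def pvQA (cs : List Char) (l : ℕ) (mr : Int) (k : ℕ) : Bool :=
  decide (mr < pvCountA cs (pvBlock cs l k) (l : Int) (k : Int) 0 (cs.length + 1))

def pvRB (cs : List Char) (l : ℕ) (starts need : Int) (j : ℕ) : Bool :=
  decide ((j : Int) < starts ∧ need ≤ (pvRunN cs l j : Int))

def pvBest (cs : List Char) (l : ℕ) (starts need : Int) (i : ℕ) : Option ℕ :=
  (List.range' i (cs.length - l - i)).find? (pvRB cs l starts need)

lemma pvFirstHit_congr (f g : Int → Option (List Char)) (l : List Int)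
    (h : ∀ x ∈ l, f x = g x) : pvFirstHit f l = pvFirstHit g l := by
  induction l with
  | nil => rfl
  | cons x xs ih =>
    simp only [pvFirstHit, h x (by simp)]
    cases g x with
    | some r => rfl
    | none => exact ih (fun y hy => h y (by simp [hy]))

lemma pvFirstHit_hit (f : Int → Option (List Char)) (P : Int → Bool) (out : Int → List Char)
    (hf : ∀ x, f x = if P x then some (out x) else none) (l : List Int) :
    pvFirstHit f l = (l.find? P).map out := by
  induction l with
  | nil => rfl
  | cons x xs ih =>
    simp only [pvFirstHit, hf x, List.find?]
    by_cases h : P x = true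
    · simp [h]
    · simp only [Bool.not_eq_true] at h; simp [h, ih]

lemma find?_congr_mem {α : Type} (p q : α → Bool) (l : List α)
    (h : ∀ x ∈ l, p x = q x) : l.find? p = l.find? q := by
  induction l with
  | nil => rfl
  | cons x xs ih =>
    simp only [List.find?, h x (by simp)]
    cases q x
    · exact ih (fun y hy => h y (by simp [hy]))
    · rfl

lemma pvCountA_shift (cs pat : List Char) (L : Int) :
    ∀ (fuel : ℕ) (pos c : Int), pvCountA cs pat L pos c fuel = c + pvCountA cs pat L pos 0 fuel := by
  intro fuel
  induction fuel with
  | zero => intro pos c; simp [pvCountA]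
  | succ fuel ih =>
    intro pos c
    simp only [pvCountA]
    split_ifs with h1 h2
    · rw [ih (pos + L) (c+1), ih (pos + L) (0+1)]; ring
    · ring
    · ring

lemma pvCountA_nonneg (cs pat : List Char) (L : Int) :
    ∀ (fuel : ℕ) (pos : Int), 0 ≤ pvCountA cs pat L pos 0 fuel := by
  intro fuel
  induction fuel with
  | zero => intro pos; simp [pvCountA]
  | succ fuel ih =>
    intro pos
    simp only [pvCountA]
    split_ifs with h1 h2
    · rw [pvCountA_shift]; have := ih (pos + L); omega
    · omega
    · omega

lemma countA_iff (cs pat : List Char) (l : ℕ) (hl : 1 ≤ l) :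
    ∀ (k : ℕ) (pos : ℕ) (fuel : ℕ), k + 1 ≤ fuel →
    ((k : Int) < pvCountA cs pat (l : Int) (pos : Int) 0 fuel ↔
      ∀ j ≤ k, pos + j * l + l ≤ cs.length ∧ pvBlock cs l (pos + j * l) = pat) := by
  intro k
  induction k with
  | zero =>
    intro pos fuel hfuel
    obtain ⟨f, rfl⟩ : ∃ f, fuel = f + 1 := ⟨fuel - 1, by omega⟩
    simp only [pvCountA]
    have hb : PySem.List.slice cs (some (pos : Int)) (some ((pos : Int) + (l : Int))) =
        pvBlock cs l pos := PySem.List.slice_natCast_add cs pos l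
    split_ifs with h1 h2
    · constructor
      · intro _ j hj
        have hj0 : j = 0 := by omega
        subst hj0
        simp only [Nat.zero_mul, Nat.add_zero]
        exact ⟨by exact_mod_cast h1, by rw [← hb]; exact h2⟩
      · intro _
        rw [pvCountA_shift]
        have := pvCountA_nonneg cs pat (l : Int) f ((pos : Int) + (l : Int))
        omega
    · constructor
      · intro hlt; omega
      · intro hR
        exfalso
        have := (hR 0 (by omega)).2
        simp only [Nat.zero_mul, Nat.add_zero] at this
        exact h2 (by rw [hb]; exact this)
    · constructor
      · intro hlt; omega
      · intro hR
        exfalso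
        have := (hR 0 (by omega)).1
        simp only [Nat.zero_mul, Nat.add_zero] at this
        exact h1 (by exact_mod_cast this)
  | succ k ih =>
    intro pos fuel hfuel
    obtain ⟨f, rfl⟩ : ∃ f, fuel = f + 1 := ⟨fuel - 1, by omega⟩
    simp only [pvCountA]
    have hb : PySem.List.slice cs (some (pos : Int)) (some ((pos : Int) + (l : Int))) =
        pvBlock cs l pos := PySem.List.slice_natCast_add cs pos l
    split_ifs with h1 h2
    · rw [pvCountA_shift]
      have hcast : (pos : Int) + (l : Int) = ((pos + l : ℕ) : Int) := by push_cast; ring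
      rw [hcast]
      have hIH := ih (pos + l) f (by omega)
      constructor
      · intro hlt j hj
        have hlt' : (k : Int) < pvCountA cs pat (l : Int) ((pos + l : ℕ) : Int) 0 f := by
          push_cast at hlt ⊢; omega
        have hR := hIH.mp hlt'
        match j, hj with
        | 0, _ =>
          simp only [Nat.zero_mul, Nat.add_zero]
          exact ⟨by exact_mod_cast h1, by rw [← hb]; exact h2⟩
        | (j'+1), hj =>
          have := hR j' (by omega)
          have he : pos + (j' + 1) * l = pos + l + j' * l := by ring
          rw [he]
          exact this
      · intro hR
        have : (k : Int) < pvCountA cs pat (l : Int) ((pos + l : ℕ) : Int) 0 f := by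
          apply hIH.mpr
          intro j hj
          have := hR (j+1) (by omega)
          have he : pos + l + j * l = pos + (j + 1) * l := by ring
          rw [he]
          exact this
        push_cast at this ⊢; omega
    · constructor
      · intro hlt; omega
      · intro hR
        exfalso
        have := (hR 0 (by omega)).2
        simp only [Nat.zero_mul, Nat.add_zero] at this
        exact h2 (by rw [hb]; exact this)
    · constructor
      · intro hlt; omega
      · intro hR
        exfalso
        have := (hR 0 (by omega)).1
        simp only [Nat.zero_mul, Nat.add_zero] at this
        exact h1 (by exact_mod_cast this)

lemma pvRunN_ge (cs : List Char) (l : ℕ) :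
    ∀ (k i : ℕ), k ≤ pvRunN cs l i ↔
      ∀ j < k, i + j < cs.length - l ∧ cs.getD (i + j) ' ' = cs.getD (i + j + l) ' ' := by
  intro k
  induction k with
  | zero => intro i; simp
  | succ k ih =>
    intro i
    rw [pvRunN]
    split_ifs with h
    · constructor
      · intro hk j hj
        match j, hj with
        | 0, _ => simpa using h
        | (j'+1), hj =>
          have h1 := (ih (i+1)).mp (by omega) j' (by omega)
          have he : i + (j' + 1) = i + 1 + j' := by omega
          rw [he]
          exact h1
      · intro hR
        have : k ≤ pvRunN cs l (i+1) := by
          apply (ih (i+1)).mpr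
          intro j hj
          have := hR (j+1) (by omega)
          have he : i + 1 + j = i + (j + 1) := by omega
          rw [he]
          exact this
        omega
    · constructor
      · intro hk; omega
      · intro hR
        exfalso
        have := hR 0 (by omega)
        simp at this
        exact h this

lemma pvBlock_getD (cs : List Char) (l r t : ℕ) (hr : r + l ≤ cs.length) (ht : t < l) :
    (pvBlock cs l r).getD t ' ' = cs.getD (r + t) ' ' := by
  unfold pvBlock
  have hlen : (List.take l (List.drop r cs)).length = l := by
    simp [List.length_take, List.length_drop]; omega
  have ht' : t < (List.take l (List.drop r cs)).length := by omega
  rw [List.getD_eq_getElem _ _ ht', List.getElem_take, List.getElem_drop,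
    List.getD_eq_getElem _ _ (by omega)]

lemma pvBlock_length (cs : List Char) (l r : ℕ) (hr : r + l ≤ cs.length) :
    (pvBlock cs l r).length = l := by
  unfold pvBlock
  simp [List.length_take, List.length_drop]; omega

lemma block_eq_iff (cs : List Char) (l p q : ℕ)
    (hp : p + l ≤ cs.length) (hq : q + l ≤ cs.length) :
    pvBlock cs l p = pvBlock cs l q ↔ ∀ t < l, cs.getD (p + t) ' ' = cs.getD (q + t) ' ' := by
  constructor
  · intro h t ht
    rw [← pvBlock_getD cs l p t hp ht, ← pvBlock_getD cs l q t hq ht, h]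
  · intro h
    apply List.ext_getElem
    · rw [pvBlock_length cs l p hp, pvBlock_length cs l q hq]
    · intro i h1 h2
      have hi : i < l := by rw [pvBlock_length cs l p hp] at h1; exact h1
      rw [← List.getD_eq_getElem (pvBlock cs l p) ' ' h1,
        ← List.getD_eq_getElem (pvBlock cs l q) ' ' h2,
        pvBlock_getD cs l p i hp hi, pvBlock_getD cs l q i hq hi]
      exact h i hi

lemma chain_iff (cs : List Char) (l s : ℕ) (m : ℕ) :
    (∀ j ≤ m, pvBlock cs l (s + j * l) = pvBlock cs l s) ↔
      ∀ k < m, pvBlock cs l (s + k * l) = pvBlock cs l (s + (k + 1) * l) := by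
  constructor
  · intro h k hk
    rw [h k (by omega), h (k+1) (by omega)]
  · intro h j hj
    induction j with
    | zero => simp
    | succ j ihj =>
      have h1 := h j (by omega)
      have h2 := ihj (by omega)
      rw [← h1, h2]

lemma forall_mul_iff (l m : ℕ) (hl : 0 < l) (P : ℕ → Prop) :
    (∀ j < m * l, P j) ↔ ∀ k < m, ∀ t < l, P (k * l + t) := by
  constructor
  · intro h k hk t ht
    have : k * l + t < m * l := by
      have h1 : k * l + t < (k + 1) * l := by simp [Nat.add_mul]; omega
      have h2 : (k + 1) * l ≤ m * l := Nat.mul_le_mul_right l hk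
      omega
    exact h _ this
  · intro h j hj
    have ht : j % l < l := Nat.mod_lt _ hl
    have hk : j / l < m := by
      rw [Nat.div_lt_iff_lt_mul hl]; omega
    have := h (j / l) hk (j % l) ht
    have heq : j / l * l + j % l = j := by
      rw [Nat.mul_comm]; exact Nat.div_add_mod j l
    rwa [heq] at this

lemma pvBest_cons (cs : List Char) (l : ℕ) (starts need : Int) (a : ℕ) (ha : a < cs.length - l) :
    pvBest cs l starts need a =
      if pvRB cs l starts need a then some a else pvBest cs l starts need (a + 1) := by
  unfold pvBest
  have h : cs.length - l - a = (cs.length - l - (a + 1)) + 1 := by omega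
  rw [h, List.range'_succ, List.find?_cons]
  cases hb : pvRB cs l starts need a <;> simp [hb]

lemma pvBest_top (cs : List Char) (l : ℕ) (starts need : Int) :
    pvBest cs l starts need (cs.length - l) = none := by
  unfold pvBest
  simp

lemma pvRunN_top (cs : List Char) (l : ℕ) : pvRunN cs l (cs.length - l) = 0 := by
  rw [pvRunN]
  rw [dif_neg]
  intro h
  omega

lemma loopB (cs : List Char) (l : ℕ) (starts need : Int) (hl : 1 ≤ l) :
    ∀ (a : ℕ), a ≤ cs.length - l →
    ((PySem.List.pyRange ((a : Int) - 1) (-1) (-1)).foldl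
      (fun (st : Int × Option Int) i =>
        let run := if PySem.List.pyGetD cs i ' ' = PySem.List.pyGetD cs (i + (l : Int)) ' ' then st.1 + 1 else 0
        let best := if i < starts ∧ need ≤ run then some i else st.2
        (run, best))
      ((pvRunN cs l a : Int), (pvBest cs l starts need a).map (fun j => (j : Int))))
    = ((pvRunN cs l 0 : Int), (pvBest cs l starts need 0).map (fun j => (j : Int))) := by
  intro a
  induction a with
  | zero =>
    intro _
    rw [PySem.List.pyRange_neg_one_eq_nil (by omega)]
    rfl
  | succ a ih =>
    intro ha
    have h1 : ((a + 1 : ℕ) : Int) - 1 = (a : ℕ) := by push_cast; ring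
    rw [h1, PySem.List.pyRange_neg_one_cons (by omega)]
    have hget1 : PySem.List.pyGetD cs ((a : ℕ) : Int) ' ' = cs.getD a ' ' :=
      PySem.List.pyGetD_natCast cs a ' '
    have hget2 : PySem.List.pyGetD cs (((a : ℕ) : Int) + (l : Int)) ' ' = cs.getD (a + l) ' ' := by
      have : ((a : ℕ) : Int) + (l : Int) = ((a + l : ℕ) : Int) := by push_cast; ring
      rw [this]
      exact PySem.List.pyGetD_natCast cs (a + l) ' '
    have hrun : (if PySem.List.pyGetD cs ((a : ℕ) : Int) ' ' = PySem.List.pyGetD cs (((a : ℕ) : Int) + (l : Int)) ' '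
        then ((pvRunN cs l (a + 1) : ℕ) : Int) + 1 else 0) = ((pvRunN cs l a : ℕ) : Int) := by
      rw [hget1, hget2]
      by_cases hc : cs.getD a ' ' = cs.getD (a + l) ' '
      · rw [if_pos hc]
        have : pvRunN cs l a = pvRunN cs l (a + 1) + 1 := by
          rw [pvRunN]; rw [dif_pos ⟨by omega, hc⟩]
        rw [this]; push_cast; ring
      · rw [if_neg hc]
        have : pvRunN cs l a = 0 := by
          rw [pvRunN]; rw [dif_neg (by intro h; exact hc h.2)]
        rw [this]; norm_num
    have hbest : (if ((a : ℕ) : Int) < starts ∧ need ≤ ((pvRunN cs l a : ℕ) : Int)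
        then some ((a : ℕ) : Int) else (pvBest cs l starts need (a + 1)).map (fun j => (j : Int)))
        = (pvBest cs l starts need a).map (fun j => (j : Int)) := by
      rw [pvBest_cons cs l starts need a (by omega)]
      by_cases hb : ((a : ℕ) : Int) < starts ∧ need ≤ ((pvRunN cs l a : ℕ) : Int)
      · rw [if_pos hb]
        have : pvRB cs l starts need a = true := by unfold pvRB; exact decide_eq_true hb
        rw [this]; simp
      · rw [if_neg hb]
        have : pvRB cs l starts need a = false := by unfold pvRB; exact decide_eq_false hb
        rw [this]; simp
    have hstep : (fun (st : Int × Option Int) i =>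
        let run := if PySem.List.pyGetD cs i ' ' = PySem.List.pyGetD cs (i + (l : Int)) ' ' then st.1 + 1 else 0
        let best := if i < starts ∧ need ≤ run then some i else st.2
        (run, best))
        (((pvRunN cs l (a+1) : ℕ) : Int), (pvBest cs l starts need (a+1)).map (fun j => (j : Int)))
        ((a : ℕ) : Int)
        = (((pvRunN cs l a : ℕ) : Int), (pvBest cs l starts need a).map (fun j => (j : Int))) := by
      simp only
      rw [hrun, hbest]
    show List.foldl _
        ((fun (st : Int × Option Int) i =>
          let run := if PySem.List.pyGetD cs i ' ' = PySem.List.pyGetD cs (i + (l : Int)) ' ' then st.1 + 1 else 0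
          let best := if i < starts ∧ need ≤ run then some i else st.2
          (run, best))
          (((pvRunN cs l (a+1) : ℕ) : Int), (pvBest cs l starts need (a+1)).map (fun j => (j : Int)))
          ((a : ℕ) : Int))
        (PySem.List.pyRange ((a : ℕ) - 1) (-1) (-1)) = _
    rw [hstep]
    exact ih (by omega)

lemma pvRunBest_eq (cs : List Char) (l : ℕ) (starts need : Int) (hl : 1 ≤ l) (hln : l ≤ cs.length) :
    pvRunBest cs (l : Int) starts need = (pvBest cs l starts need 0).map (fun j => (j : Int)) := by
  unfold pvRunBest
  have h1 : (cs.length : Int) - (l : Int) - 1 = ((cs.length - l : ℕ) : Int) - 1 := by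
    push_cast [hln]; ring
  rw [h1]
  have h0 : ((0 : Int), (none : Option Int)) =
      (((pvRunN cs l (cs.length - l) : ℕ) : Int),
        (pvBest cs l starts need (cs.length - l)).map (fun j => (j : Int))) := by
    rw [pvRunN_top, pvBest_top]; rfl
  rw [h0, loopB cs l starts need hl (cs.length - l) (le_refl _)]

lemma QA_eq_RB (cs : List Char) (l mrN : ℕ) (hl : 1 ≤ l)
    (hS : l * (mrN + 1) < cs.length) (j : ℕ) (hj : j < cs.length - l * (mrN + 1)) :
    pvQA cs l (mrN : Int) j =
      pvRB cs l ((cs.length : Int) - (l : Int) * ((mrN : Int) + 1)) ((l : Int) * (mrN : Int)) j := by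
  have hml : l * (mrN + 1) = l * mrN + l := by ring
  have hcomm : mrN * l = l * mrN := Nat.mul_comm _ _
  have hmn : mrN < cs.length := by
    have := Nat.le_mul_of_pos_left (mrN + 1) (show 0 < l by omega)
    omega
  unfold pvQA pvRB
  rw [decide_eq_decide]
  have hfit : ∀ jj ≤ mrN, j + jj * l + l ≤ cs.length := by
    intro jj hjj
    have h2 : jj * l ≤ mrN * l := Nat.mul_le_mul_right l hjj
    omega
  have h2 : ((mrN : Int) < pvCountA cs (pvBlock cs l j) (l : Int) (j : Int) 0 (cs.length + 1)) ↔
      ∀ jj ≤ mrN, pvBlock cs l (j + jj * l) = pvBlock cs l j := by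
    rw [countA_iff cs (pvBlock cs l j) l hl mrN j (cs.length + 1) (by omega)]
    constructor
    · intro h jj hjj; exact (h jj hjj).2
    · intro h jj hjj; exact ⟨hfit jj hjj, h jj hjj⟩
  rw [h2, chain_iff]
  have h3 : (∀ k < mrN, pvBlock cs l (j + k * l) = pvBlock cs l (j + (k + 1) * l)) ↔
      ∀ k < mrN, ∀ t < l, cs.getD (j + (k * l + t)) ' ' = cs.getD (j + (k * l + t) + l) ' ' := by
    apply forall_congr'
    intro k
    apply imp_congr_right
    intro hk
    rw [block_eq_iff cs l (j + k * l) (j + (k + 1) * l) (hfit k (by omega)) (hfit (k+1) (by omega))]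
    constructor
    · intro h t ht
      have := h t ht
      have e1 : j + k * l + t = j + (k * l + t) := by ring
      have e2 : j + (k + 1) * l + t = j + (k * l + t) + l := by ring
      rw [e1, e2] at this; exact this
    · intro h t ht
      have := h t ht
      have e1 : j + k * l + t = j + (k * l + t) := by ring
      have e2 : j + (k + 1) * l + t = j + (k * l + t) + l := by ring
      rw [e1, e2]; exact this
  rw [h3, ← forall_mul_iff l mrN (by omega)
    (fun jj => cs.getD (j + jj) ' ' = cs.getD (j + jj + l) ' ')]
  have hrun := pvRunN_ge cs l (l * mrN) j
  have hc1 : ((l * (mrN + 1) : ℕ) : Int) = (l : Int) * ((mrN : Int) + 1) := by push_cast; ring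
  have hc2 : ((l * mrN : ℕ) : Int) = (l : Int) * (mrN : Int) := by push_cast; ring
  constructor
  · intro h
    refine ⟨by omega, ?_⟩
    have : l * mrN ≤ pvRunN cs l j := by
      rw [hrun]
      intro jj hjj
      exact ⟨by omega, h jj (by omega)⟩
    omega
  · rintro ⟨-, hneed⟩ jj hjj
    have : l * mrN ≤ pvRunN cs l j := by omega
    exact ((hrun.mp this) jj (by omega)).2

lemma innerA (cs : List Char) (l : ℕ) (mr : Int) (S : Int) :
    pvFirstHit (fun start =>
        let pattern := PySem.List.slice cs (some start) (some (start + (l : Int)))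
        let count := pvCountA cs pattern (l : Int) start 0 (cs.length + 1)
        if count > mr then
          some (pvRstrip (PySem.List.slice cs none (some (start + (l : Int)))) ['-', '_', ' '])
        else none)
      (PySem.List.pyRange 0 S 1)
    = ((List.range S.toNat).find? (pvQA cs l mr)).map
        (fun k => pvRstrip (cs.take (k + l)) ['-', '_', ' ']) := by
  rw [pvFirstHit_hit _
    (fun x => decide (mr < pvCountA cs (PySem.List.slice cs (some x) (some (x + (l : Int)))) (l : Int) x 0 (cs.length + 1)))
    (fun x => pvRstrip (PySem.List.slice cs none (some (x + (l : Int)))) ['-', '_', ' ']) ?hf]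
  case hf =>
    intro x
    by_cases h : mr < pvCountA cs (PySem.List.slice cs (some x) (some (x + (l : Int)))) (l : Int) x 0 (cs.length + 1)
    · simp [h]
    · simp [h]
  rw [PySem.List.pyRange_one, List.find?_map, Option.map_map]
  have he : (S - 0).toNat = S.toNat := by norm_num
  rw [he]
  have hpred : ((fun x => decide (mr < pvCountA cs (PySem.List.slice cs (some x) (some (x + (l : Int)))) (l : Int) x 0 (cs.length + 1))) ∘ (fun k : ℕ => (0 : Int) + (k : Int)))
      = pvQA cs l mr := by
    funext k
    simp only [Function.comp, zero_add, pvQA]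
    rw [show ((k : Int) + (l : Int)) = (((k + l : ℕ)) : Int) by push_cast; ring]
    rw [show PySem.List.slice cs (some (k : Int)) (some ((k + l : ℕ) : Int)) = pvBlock cs l k from ?_]
    · rw [show (((k + l : ℕ)) : Int) = ((k : Int) + (l : Int)) by push_cast; ring]
      exact PySem.List.slice_natCast_add cs k l
  have hout : ((fun x => pvRstrip (PySem.List.slice cs none (some (x + (l : Int)))) ['-', '_', ' ']) ∘ (fun k : ℕ => (0 : Int) + (k : Int)))
      = (fun k : ℕ => pvRstrip (cs.take (k + l)) ['-', '_', ' ']) := by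
    funext k
    simp only [Function.comp, zero_add]
    rw [show ((k : Int) + (l : Int)) = (((k + l : ℕ)) : Int) by push_cast; ring,
      PySem.List.slice_to_natCast]
  rw [hpred, hout]

lemma innerB (cs : List Char) (l : ℕ) (starts need : Int) (hl : 1 ≤ l) (hln : l ≤ cs.length) :
    (match pvRunBest cs (l : Int) starts need with
      | some best => some (pvRstrip (PySem.List.slice cs none (some (best + (l : Int)))) ['-', '_', ' '])
      | none => none)
    = ((List.range (cs.length - l)).find? (pvRB cs l starts need)).map
        (fun k => pvRstrip (cs.take (k + l)) ['-', '_', ' ']) := by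
  rw [pvRunBest_eq cs l starts need hl hln]
  have hb : pvBest cs l starts need 0 = (List.range (cs.length - l)).find? (pvRB cs l starts need) := by
    unfold pvBest
    rw [List.range_eq_range']
    norm_num
  rw [hb]
  cases h : (List.range (cs.length - l)).find? (pvRB cs l starts need) with
  | none => rfl
  | some k =>
    show some (pvRstrip (PySem.List.slice cs none (some ((k : Int) + (l : Int)))) ['-', '_', ' ']) = _
    rw [show ((k : Int) + (l : Int)) = (((k + l : ℕ)) : Int) by push_cast; ring,
      PySem.List.slice_to_natCast]
    rfl

lemma perL (cs : List Char) (l : ℕ) (mr : Int) (hl : 1 ≤ l) (hn : 3 * l + 3 ≤ cs.length) :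
    pvFirstHit (fun start =>
        let pattern := PySem.List.slice cs (some start) (some (start + (l : Int)))
        let count := pvCountA cs pattern (l : Int) start 0 (cs.length + 1)
        if count > mr then
          some (pvRstrip (PySem.List.slice cs none (some (start + (l : Int)))) ['-', '_', ' '])
        else none)
      (PySem.List.pyRange 0 ((cs.length : Int) - (l : Int) * (mr + 1)) 1)
    = (if (cs.length : Int) - (l : Int) * (mr + 1) ≤ 0 then none
       else
         match pvRunBest cs (l : Int) ((cs.length : Int) - (l : Int) * (mr + 1)) ((l : Int) * mr) with
         | some best => some (pvRstrip (PySem.List.slice cs none (some (best + (l : Int)))) ['-', '_', ' '])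
         | none => none) := by
  rw [innerA cs l mr ((cs.length : Int) - (l : Int) * (mr + 1))]
  by_cases hS : (cs.length : Int) - (l : Int) * (mr + 1) ≤ 0
  · rw [if_pos hS, Int.toNat_of_nonpos hS]
    rfl
  · rw [if_neg hS, innerB cs l ((cs.length : Int) - (l : Int) * (mr + 1)) ((l : Int) * mr) hl (by omega)]
    push_neg at hS
    congr 1
    by_cases hmr : 0 ≤ mr
    · obtain ⟨mrN, rfl⟩ : ∃ m : ℕ, mr = (m : Int) := ⟨mr.toNat, (Int.toNat_of_nonneg hmr).symm⟩
      have hc1 : ((l * (mrN + 1) : ℕ) : Int) = (l : Int) * ((mrN : Int) + 1) := by push_cast; ring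
      have hSnat : l * (mrN + 1) < cs.length := by omega
      have hSt : ((cs.length : Int) - (l : Int) * ((mrN : Int) + 1)).toNat
          = cs.length - l * (mrN + 1) := by omega
      rw [hSt]
      have hcl : l * (mrN + 1) = l * mrN + l := by ring
      rw [show cs.length - l = (cs.length - l * (mrN + 1)) + ((cs.length - l) - (cs.length - l * (mrN + 1))) by omega,
        List.range_add, List.find?_append]
      have h1 : (List.range (cs.length - l * (mrN + 1))).find?
            (pvRB cs l ((cs.length : Int) - (l : Int) * ((mrN : Int) + 1)) ((l : Int) * (mrN : Int)))
          = (List.range (cs.length - l * (mrN + 1))).find? (pvQA cs l (mrN : Int)) := by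
        apply find?_congr_mem
        intro j hj
        rw [List.mem_range] at hj
        exact (QA_eq_RB cs l mrN hl hSnat j hj).symm
      have h2 : (List.map (fun x => cs.length - l * (mrN + 1) + x)
            (List.range ((cs.length - l) - (cs.length - l * (mrN + 1))))).find?
            (pvRB cs l ((cs.length : Int) - (l : Int) * ((mrN : Int) + 1)) ((l : Int) * (mrN : Int)))
          = none := by
        rw [List.find?_eq_none]
        intro x hx
        rw [List.mem_map] at hx
        obtain ⟨y, -, rfl⟩ := hx
        unfold pvRB
        simp only [decide_eq_true_eq, not_and]
        intro hlt
        exfalso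
        have : ((cs.length - l * (mrN + 1) + y : ℕ) : Int) ≥ (cs.length : Int) - (l : Int) * ((mrN : Int) + 1) := by
          push_cast
          omega
        omega
      rw [h1, h2, Option.or_none]
    · push_neg at hmr
      have hneg : (l : Int) * (mr + 1) ≤ 0 :=
        mul_nonpos_of_nonneg_of_nonpos (by positivity) (by omega)
      have hst1 : 1 ≤ ((cs.length : Int) - (l : Int) * (mr + 1)).toNat := by omega
      obtain ⟨st, hst⟩ : ∃ st, ((cs.length : Int) - (l : Int) * (mr + 1)).toNat = st + 1 :=
        ⟨((cs.length : Int) - (l : Int) * (mr + 1)).toNat - 1, by omega⟩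
      obtain ⟨st', hst'⟩ : ∃ st', cs.length - l = st' + 1 := ⟨cs.length - l - 1, by omega⟩
      rw [hst, hst', List.range_succ_eq_map, List.range_succ_eq_map, List.find?_cons, List.find?_cons]
      have hQ : pvQA cs l mr 0 = true := by
        unfold pvQA
        apply decide_eq_true
        have h := pvCountA_nonneg cs (pvBlock cs l 0) (l : Int) (cs.length + 1) (((0 : ℕ) : Int))
        omega
      have hR : pvRB cs l ((cs.length : Int) - (l : Int) * (mr + 1)) ((l : Int) * mr) 0 = true := by
        unfold pvRB
        apply decide_eq_true
        constructor
        · exact_mod_cast hS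
        · have hneg2 : (l : Int) * mr < 0 :=
            mul_neg_of_pos_of_neg (by positivity) (by omega)
          have : (0 : Int) ≤ ((pvRunN cs l 0 : ℕ) : Int) := by positivity
          omega
      rw [hQ, hR]

lemma outer_eq (cs : List Char) (minL mr : Int)
    (hPre : 1 ≤ minL ∨ min 200 (PySem.Int.floordiv ((cs.length : ℕ) : Int) 3) ≤ minL) :
    pvFirstHit (fun pattern_len =>
        pvFirstHit (fun start =>
            let pattern := PySem.List.slice cs (some start) (some (start + pattern_len))
            let count := pvCountA cs pattern pattern_len start 0 (cs.length + 1)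
            if count > mr then
              some (pvRstrip (PySem.List.slice cs none (some (start + pattern_len))) ['-', '_', ' '])
            else none)
          (PySem.List.pyRange 0 ((cs.length : Int) - pattern_len * (mr + 1)) 1))
      (PySem.List.pyRange minL (min 200 (PySem.Int.floordiv (cs.length : Int) 3)) 5)
    = pvFirstHit (fun pattern_len =>
        let starts := (cs.length : Int) - pattern_len * (mr + 1)
        if starts ≤ 0 then none
        else
          match pvRunBest cs pattern_len starts (pattern_len * mr) with
          | some best => some (pvRstrip (PySem.List.slice cs none (some (best + pattern_len))) ['-', '_', ' '])
          | none => none)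
      (PySem.List.pyRange minL (min 200 (PySem.Int.floordiv (cs.length : Int) 3)) 5) := by
  rcases hPre with hPre | hPre
  · apply pvFirstHit_congr
    intro L hL
    rw [PySem.List.mem_pyRange_iff_of_pos (by norm_num)] at hL
    obtain ⟨h1, h2, -⟩ := hL
    have hL3 : L < PySem.Int.floordiv ((cs.length : ℕ) : Int) 3 := lt_of_lt_of_le h2 (min_le_right _ _)
    have hfd : PySem.Int.floordiv ((cs.length : ℕ) : Int) 3 = ((cs.length : ℕ) : Int) / 3 := by
      unfold PySem.Int.floordiv
      rw [Int.fdiv_eq_ediv, if_pos (Or.inl (by norm_num : (0 : Int) ≤ 3))]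
      ring
    have h3 : 3 * (L + 1) ≤ ((cs.length : ℕ) : Int) := by
      rw [hfd] at hL3
      have := (Int.le_ediv_iff_mul_le (by norm_num : (0 : Int) < 3)).mp
        (by omega : L + 1 ≤ ((cs.length : ℕ) : Int) / 3)
      omega
    obtain ⟨l, rfl⟩ : ∃ l : ℕ, L = (l : Int) := ⟨L.toNat, (Int.toNat_of_nonneg (by omega)).symm⟩
    have hl : 1 ≤ l := by omega
    have hn : 3 * l + 3 ≤ cs.length := by omega
    exact perL cs l mr hl hn
  · rw [PySem.List.pyRange_of_pos minL (min 200 (PySem.Int.floordiv (cs.length : Int) 3)) (by norm_num),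
      if_neg (not_lt.mpr hPre)]
    rfl

theorem truncate_repetition_py_spec : Claim_equal_truncate_repetition_py := by
  unfold Claim_equal_truncate_repetition_py
  intro text minL mr hDom hPre
  unfold Spec_truncate_repetition_py
  unfold truncate_repetition_py truncate_repetition_py_alt
  dsimp only
  rw [outer_eq text.toList minL mr hPre]
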